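-- pv_equiv track=rewrite | github.com/ejmejm/AI-Art-Generation | utils.py | sanitize_folder_name
-- ===== SOURCE A (Python) =====
-- from string import ascii_letters, digits
--
-- FOLDER_NAME_ALLOW_LIST = set(ascii_letters + digits + '_-')
--
-- def sanitize_folder_name(name):
--     clean_name = ''
--     for c in name:
--         if c in FOLDER_NAME_ALLOW_LIST:
--             clean_name += c
--         else:
--             clean_name += '_'
--     return clean_name
-- ===== SOURCE B (Python) =====
-- from string import ascii_letters, digits
--
-- FOLDER_NAME_ALLOW_LIST = set(ascii_letters + digits + '_-')
--
--
-- class _UnderscoreTable(dict):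
--     """Translation table: any code point not present maps to '_'."""
--     def __missing__(self, key):
--         return '_'
--
--
-- _TRANS_TABLE = _UnderscoreTable((ord(c), c) for c in ascii_letters + digits + '_-')
--
--
-- def sanitize_folder_name(name):
--     return name.translate(_TRANS_TABLE)
-- ===== Notes on version B (the rewrite author's own statement) =====
-- stated objective: faster
-- what changed: Replaces the explicit per-character loop with membership test and string concatenation by a precomputed ord->char translation table (defaulting to '_') applied in one str.translate pass.
import Mathlib
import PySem

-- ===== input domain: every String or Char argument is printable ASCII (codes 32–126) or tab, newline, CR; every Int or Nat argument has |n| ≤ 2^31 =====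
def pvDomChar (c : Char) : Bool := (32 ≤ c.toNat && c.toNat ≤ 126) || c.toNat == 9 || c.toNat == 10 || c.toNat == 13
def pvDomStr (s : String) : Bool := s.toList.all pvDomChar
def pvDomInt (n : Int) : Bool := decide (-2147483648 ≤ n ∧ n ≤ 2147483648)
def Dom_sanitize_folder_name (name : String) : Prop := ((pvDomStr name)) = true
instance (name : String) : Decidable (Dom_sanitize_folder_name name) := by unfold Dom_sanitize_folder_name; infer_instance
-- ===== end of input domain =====

-- B replaces A's per-character loop (set membership + string concatenation) by a precomputed
-- ord→char translation table applied in one translate pass (measured faster in Python).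

-- ===== PORT A =====
-- ascii_letters + digits + '_-'
def pvAllowedChars : List Char :=
  "abcdefghijklmnopqrstuvwxyzABCDEFGHIJKLMNOPQRSTUVWXYZ0123456789_-".toList

def FOLDER_NAME_ALLOW_LIST : PySem.Set Char := PySem.Set.ofList pvAllowedChars

def sanitize_folder_name (name : String) : String :=
  String.mk (name.toList.foldl
    (fun acc c => acc ++ [if PySem.Set.contains FOLDER_NAME_ALLOW_LIST c then c else '_'])
    [])

-- ===== PORT B =====
-- the _UnderscoreTable: ord(c) → c for each allowed char; any other key yields '_'
def pvTransTable : PySem.Dict Int Char :=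
  PySem.Dict.ofList (pvAllowedChars.map (fun c => ((c.toNat : Int), c)))

-- str.translate: each char looked up by code point, '_' when missing
def sanitize_folder_name_alt (name : String) : String :=
  String.mk (name.toList.map (fun c => pvTransTable.getD ((c.toNat : Int)) '_'))

-- ===== PRECONDITION & SPEC =====
def Spec_sanitize_folder_name (name : String) (out : String) : Prop := out = sanitize_folder_name_alt name
instance (name : String) (out : String) : Decidable (Spec_sanitize_folder_name name out) := by unfold Spec_sanitize_folder_name; infer_instance

-- ===== CLAIM (what is proved, stated in full; the proofs are below) =====
def Claim_equal_sanitize_folder_name : Prop := ∀ (name : String), Dom_sanitize_folder_name name → Spec_sanitize_folder_name name (sanitize_folder_name name)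

-- ===== LEMMAS AND PROOFS =====

-- the table's items are exactly the (ord c, c) pairs, in order
set_option maxRecDepth 40000 in
theorem pvTable_items :
    pvTransTable.items = pvAllowedChars.map (fun c => ((c.toNat : Int), c)) := by
  decide

theorem pvTable_lookup (c : Char) :
    pvTransTable.getD ((c.toNat : Int)) '_' =
      if PySem.Set.contains FOLDER_NAME_ALLOW_LIST c then c else '_' := by
  have hnodup : pvTransTable.keys.Nodup := PySem.Dict.nodup_keys_ofList _
  by_cases hc : c ∈ pvAllowedChars
  · have hmem : ((c.toNat : Int), c) ∈ pvTransTable.items := by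
      rw [pvTable_items]
      exact List.mem_map.mpr ⟨c, hc, rfl⟩
    rw [PySem.Dict.getD_of_mem_items _ hmem hnodup]
    rw [if_pos ((PySem.Set.contains_iff FOLDER_NAME_ALLOW_LIST c).mpr (((PySem.Set.mem_ofList _ _).mpr hc : c ∈ FOLDER_NAME_ALLOW_LIST)))]
  · have hkeys : pvTransTable.keys = pvAllowedChars.map (fun c => ((c.toNat : Int))) := by
      show pvTransTable.items.map (·.1) = _
      rw [pvTable_items, List.map_map]
      rfl
    have hnc : pvTransTable.contains ((c.toNat : Int)) = false := by
      rw [PySem.Dict.contains_eq_decide_mem_keys, hkeys, decide_eq_false_iff_not]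
      intro hm
      obtain ⟨d, hd, he⟩ := List.mem_map.mp hm
      have : d = c := Char.ext (UInt32.toNat_inj.mp (Int.natCast_inj.mp he))
      exact hc (this ▸ hd)
    rw [PySem.Dict.getD_of_not_contains _ _ hnc]
    have : PySem.Set.contains FOLDER_NAME_ALLOW_LIST c = false := by
      rw [← Bool.not_eq_true, PySem.Set.contains_iff]
      exact fun h => hc ((PySem.Set.mem_ofList _ _).mp (h : c ∈ PySem.Set.ofList pvAllowedChars))
    rw [this]
    rfl

theorem flatMap_singleton_is_map (l : List Char) (f : Char → Char) :
    l.flatMap (fun c => [f c]) = l.map f := by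
  induction l with
  | nil => rfl
  | cons x xs ih => simp [List.flatMap_cons, ih]

theorem sanitize_folder_name_spec : Claim_equal_sanitize_folder_name := by
  intro name _
  unfold Spec_sanitize_folder_name sanitize_folder_name sanitize_folder_name_alt
  have h := PySem.List.foldl_append_eq_flatMap
    (l := name.toList) (acc := ([] : List Char))
    (g := fun c => [if PySem.Set.contains FOLDER_NAME_ALLOW_LIST c then c else '_'])
  rw [h]
  simp only [List.nil_append, flatMap_singleton_is_map]
  simp [pvTable_lookup]
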